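-- pv_equiv track=rewrite | github.com/AlpAcA0072/Leetcode_Intern | OriginalProject/src/temp/oppo/oppo02.py | min_deletions_to_make_multiple
-- ===== SOURCE A (Python) =====
-- def min_deletions_to_make_multiple(n_str, k):
--     n_len = len(n_str)
--
--     # 1D dp array for current state and next state
--     dp_prev = {}
--     dp_curr = {}
--     dp_prev[0] = 0
--
--     for i in range(n_len):
--         current_digit = int(n_str[i])
--
--         # Reset dp_curr for the current digit
--         dp_curr = {}
--
--         for j in range(k):
--             if dp_prev.get(j) != None:
--                 # Case 1: Don't delete the current digit
--                 new_mod = (j * 10 + current_digit) % k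
--                 dp_curr[new_mod] = min(
--                     dp_curr.get(new_mod, float("inf")), dp_prev.get(j, float("inf"))
--                 )
--
--                 # Case 2: Delete the current digit
--                 dp_curr[j] = min(
--                     dp_curr.get(j, float("inf")), dp_prev.get(j, float("inf")) + 1
--                 )
--
--         # Move dp_curr to dp_prev for the next iteration
--         dp_prev = dp_curr
--
--     return dp_prev.get(0, n_len)
-- ===== SOURCE B (Python) =====
-- def min_deletions_to_make_multiple(n_str, k):
--     # Layered reachability instead of a residue-keyed DP: layers[c] is the set of
--     # residues mod k obtainable by keeping exactly c digits of n_str (as a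
--     # subsequence).  Each digit appends a new (initially empty) top layer and,
--     # scanning counts top-down, merges the keep-transition image of layer c into
--     # layer c+1; deletions never change a layer.  The answer is
--     # len(n_str) - (largest c with 0 in layers[c]); layers[0] == {0} always.
--     layers = [{0}]
--     for ch in n_str:
--         d = int(ch)
--         layers.append(set())
--         for c in range(len(layers) - 2, -1, -1):
--             layers[c + 1] |= {(r * 10 + d) % k for r in layers[c]}
--     for c in range(len(layers) - 1, -1, -1):
--         if 0 in layers[c]:
--             return len(n_str) - c
-- ===== Notes on version B (the rewrite author's own statement) =====
-- stated objective: alternative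
-- what changed: Replaces A's residue-keyed min-deletions dict DP by a transposed layered-reachability algorithm: a growing list of sets layers[c] = residues reachable by keeping exactly c digits, updated top-down per digit, with the answer read off as len(n_str) minus the topmost layer containing residue 0.
-- outside the precondition, e.g. on min_deletions_to_make_multiple('12', 0): A returns 2, B raises ZeroDivisionError; on min_deletions_to_make_multiple('12', -3): A returns 2, B returns 0
import Mathlib
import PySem

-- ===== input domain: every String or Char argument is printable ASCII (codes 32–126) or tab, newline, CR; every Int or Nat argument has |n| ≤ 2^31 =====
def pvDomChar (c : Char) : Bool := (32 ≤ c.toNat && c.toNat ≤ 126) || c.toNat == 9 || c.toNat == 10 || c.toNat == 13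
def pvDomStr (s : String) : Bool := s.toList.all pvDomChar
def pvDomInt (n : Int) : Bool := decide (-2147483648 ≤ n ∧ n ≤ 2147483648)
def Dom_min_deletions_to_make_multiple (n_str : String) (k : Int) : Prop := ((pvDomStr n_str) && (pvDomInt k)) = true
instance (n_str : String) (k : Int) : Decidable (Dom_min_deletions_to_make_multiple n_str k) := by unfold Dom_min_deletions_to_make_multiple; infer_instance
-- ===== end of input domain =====

-- B replaces A's residue-keyed min-deletions dict DP by a transposed layered-reachability
-- algorithm (layers[c] = set of residues reachable keeping exactly c digits); alternative
-- decomposition, same values on Pre_.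

-- int(n_str[i]) for a single character; exact when c is an ASCII digit, which Pre_ guarantees
def pvDigit (c : Char) : Int := (c.toNat : Int) - 48

-- ===== PORT A =====
-- inner 'for j in range(k)' loop of A, rebuilding dp_curr from the empty dict
def pvA_inner (dp_prev : PySem.Dict Int Int) (d k : Int) : PySem.Dict Int Int :=
  (PySem.List.pyRange 0 k 1).foldl (fun dp_curr j =>
    match dp_prev.get? j with
    | none => dp_curr
    | some v =>
        let new_mod := PySem.Int.mod (j * 10 + d) k
        let dp1 := dp_curr.insert new_mod
          (match dp_curr.get? new_mod with | none => v | some w => min w v)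
        dp1.insert j (match dp1.get? j with | none => v + 1 | some w => min w (v + 1))
    ) PySem.Dict.empty

def min_deletions_to_make_multiple (n_str : String) (k : Int) : Int :=
  let n_len : Int := PySem.Str.len n_str
  let dp0 := (PySem.Dict.empty : PySem.Dict Int Int).insert 0 0
  let dp := n_str.toList.foldl (fun dp_prev c => pvA_inner dp_prev (pvDigit c) k) dp0
  (dp.get? 0).getD n_len

-- ===== PORT B =====
-- the set comprehension {(r*10+d)%k for r in s}; the Set it builds is order-independent
def pvImg (s : PySem.Set Int) (d k : Int) : PySem.Set Int :=
  PySem.Set.ofList (s.map (fun r => PySem.Int.mod (r * 10 + d) k))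

-- one digit of B: append an empty top layer, then for c from len(layers)-2 down to 0
-- merge the keep-transition image of layer c into layer c+1 (indices c, c+1 are always
-- in range, so getD/set are exact)
def pvB_step (layers : List (PySem.Set Int)) (d k : Int) : List (PySem.Set Int) :=
  let ls := layers ++ [(PySem.Set.empty : PySem.Set Int)]
  (PySem.List.pyRange ((ls.length : Int) - 2) (-1) (-1)).foldl
    (fun ls c =>
      ls.set (c + 1).toNat
        (PySem.Set.union (ls.getD (c + 1).toNat PySem.Set.empty)
          (pvImg (ls.getD c.toNat PySem.Set.empty) d k))) ls

def min_deletions_to_make_multiple_alt (n_str : String) (k : Int) : Int :=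
  let layers := n_str.toList.foldl (fun ls ch => pvB_step ls (pvDigit ch) k)
    [PySem.Set.ofList [(0 : Int)]]
  -- final 'for c in range(len(layers)-1, -1, -1): if 0 in layers[c]: return len - c'
  match (PySem.List.pyRange ((layers.length : Int) - 1) (-1) (-1)).find?
      (fun c => PySem.Set.contains (layers.getD c.toNat PySem.Set.empty) 0) with
  | some c => PySem.Str.len n_str - c
  | none => 0  -- unreachable: 0 ∈ layers[0] always

-- ===== PRECONDITION & SPEC =====
-- Pre_ excludes k ≤ 0 on nonempty strings, where A's return of n_len is the unreachable-dict
-- default (range(k) is empty) while B raises ZeroDivisionError for k = 0 and computes true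
-- divisibility for k < 0, and strings with a non-digit character, where A raises ValueError
-- at int(n_str[i]).
def Pre_min_deletions_to_make_multiple (n_str : String) (k : Int) : Prop :=
  (1 ≤ k ∨ n_str.toList = []) ∧ n_str.toList.all (fun c => PySem.Chars.isdigit c) = true
instance (n_str : String) (k : Int) : Decidable (Pre_min_deletions_to_make_multiple n_str k) := by
  unfold Pre_min_deletions_to_make_multiple; infer_instance

def pvWitness_min_deletions_to_make_multiple : String × Int := ("1024", 3)

def Spec_min_deletions_to_make_multiple (n_str : String) (k : Int) (out : Int) : Prop := out = min_deletions_to_make_multiple_alt n_str k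
instance (n_str : String) (k : Int) (out : Int) : Decidable (Spec_min_deletions_to_make_multiple n_str k out) := by unfold Spec_min_deletions_to_make_multiple; infer_instance

-- ===== CLAIM (what is proved, stated in full; the proofs are below) =====
def Claim_equal_min_deletions_to_make_multiple : Prop := ∀ (n_str : String) (k : Int), Dom_min_deletions_to_make_multiple n_str k → Pre_min_deletions_to_make_multiple n_str k → Spec_min_deletions_to_make_multiple n_str k (min_deletions_to_make_multiple n_str k)

-- ===== LEMMAS AND PROOFS =====

-- GHOST state shared by both proofs: the array residue → max kept digits (-1 = unreachable).
-- A's dict is this array written in min-deletion units; B's layers are its fibers.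
def pvGStep (kept : List Int) (d k : Int) : List Int :=
  (PySem.List.pyRange 0 k 1).foldl (fun nxt r =>
    if 0 ≤ kept.getD r.toNat (-1) then
      let nr := PySem.Int.mod (r * 10 + d) k
      if kept.getD r.toNat (-1) + 1 > nxt.getD nr.toNat (-1) then
        nxt.set nr.toNat (kept.getD r.toNat (-1) + 1)
      else nxt
    else nxt) kept

-- deletions stored by A, written in kept-digit units: x kept digits out of i processed
def pvToOpt (i x : Int) : Option Int := if 0 ≤ x then some (i - x) else none

-- best keep-transition value (kept digits) into residue r contributed by source residues j < m
def pvKeep (kept : List Int) (d k : Int) : Nat → Int → Int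
  | 0, _ => -1
  | m + 1, r =>
      let x := pvKeep kept d k m r
      if 0 ≤ kept.getD m (-1) ∧ PySem.Int.mod ((m : Int) * 10 + d) k = r then
        max x (kept.getD m (-1) + 1)
      else x

-- A's dp_curr after the first m inner steps, in kept-digit units: keep-transitions from j < m
-- plus the delete-transition at j = r (already applied iff r < m)
def pvAX (kept : List Int) (d k : Int) (m : Nat) (r : Int) : Int :=
  max (if r < (m : Int) ∧ 0 ≤ kept.getD r.toNat (-1) then kept.getD r.toNat (-1) else -1)
      (pvKeep kept d k m r)

-- joint invariant of A's dict and the ghost array after i digits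
def pvRel (k i : Int) (dp : PySem.Dict Int Int) (kept : List Int) : Prop :=
  kept.length = k.toNat ∧
  0 ≤ kept.getD 0 (-1) ∧
  (∀ n : Nat, -1 ≤ kept.getD n (-1)) ∧
  (∀ r : Int, 0 ≤ r → r < k → dp.get? r = pvToOpt i (kept.getD r.toNat (-1)))

-- invariant of B's layers against the ghost array after i digits:
-- layer 0 is {0}, layers hold residues in [0,k), and kept[r] is the topmost layer holding r
def pvLInv (k : Int) (i : Nat) (layers : List (PySem.Set Int)) (kept : List Int) : Prop :=
  layers.length = i + 1 ∧
  layers.getD 0 PySem.Set.empty = [(0 : Int)] ∧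
  (∀ c : Nat, ∀ r : Int, r ∈ layers.getD c PySem.Set.empty → 0 ≤ r ∧ r < k) ∧
  (∀ r : Int, 0 ≤ r → r < k →
    ((kept.getD r.toNat (-1) = -1 ∧ ∀ c : Nat, r ∉ layers.getD c PySem.Set.empty) ∨
     (∃ c : Nat, kept.getD r.toNat (-1) = (c : Int) ∧ r ∈ layers.getD c PySem.Set.empty ∧
        ∀ c' : Nat, c < c' → r ∉ layers.getD c' PySem.Set.empty)))

theorem pvKeep_ge (kept : List Int) (d k : Int) (m : Nat) (r : Int) :
    -1 ≤ pvKeep kept d k m r := by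
  induction m with
  | zero => simp [pvKeep]
  | succ m ih => simp only [pvKeep]; split <;> omega

theorem pvAX_ge (kept : List Int) (d k : Int) (m : Nat) (r : Int) : -1 ≤ pvAX kept d k m r :=
  le_trans (pvKeep_ge kept d k m r) (le_max_right _ _)

theorem pvKeep_succ_pos (kept : List Int) (d k : Int) (m : Nat) (r : Int)
    (h : 0 ≤ kept.getD m (-1)) :
    pvKeep kept d k (m+1) r =
      if PySem.Int.mod ((m : Int) * 10 + d) k = r then
        max (pvKeep kept d k m r) (kept.getD m (-1) + 1)
      else pvKeep kept d k m r := by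
  simp only [pvKeep]
  split_ifs with h1 h2 <;> first | rfl | (exfalso; tauto)

theorem pvKeep_succ_neg (kept : List Int) (d k : Int) (m : Nat) (r : Int)
    (h : ¬ 0 ≤ kept.getD m (-1)) :
    pvKeep kept d k (m+1) r = pvKeep kept d k m r := by
  simp only [pvKeep]; rw [if_neg (by tauto)]

-- pvKeep is the max of its contributions: lower bound …
theorem pvKeep_ge_of (kept : List Int) (d k : Int) (m : Nat) (r : Int)
    (j : Nat) (hj : j < m) (hk0 : 0 ≤ kept.getD j (-1))
    (ht : PySem.Int.mod ((j : Int) * 10 + d) k = r) :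
    kept.getD j (-1) + 1 ≤ pvKeep kept d k m r := by
  induction m with
  | zero => omega
  | succ m ih =>
      simp only [pvKeep]
      by_cases hjm : j = m
      · subst hjm; rw [if_pos ⟨hk0, ht⟩]; omega
      · have h1 := ih (by omega)
        split <;> omega

-- … and it is attained
theorem pvKeep_attained (kept : List Int) (d k : Int) (m : Nat) (r : Int) :
    pvKeep kept d k m r = -1 ∨
    ∃ j : Nat, j < m ∧ 0 ≤ kept.getD j (-1) ∧ PySem.Int.mod ((j : Int) * 10 + d) k = r ∧
      pvKeep kept d k m r = kept.getD j (-1) + 1 := by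
  induction m with
  | zero => left; rfl
  | succ m ih =>
      simp only [pvKeep]
      split_ifs with h1
      · rcases ih with h | ⟨j, hj, h2, h3, h4⟩
        · right; exact ⟨m, by omega, h1.1, h1.2, by rw [h]; omega⟩
        · by_cases hc : kept.getD j (-1) + 1 ≤ kept.getD m (-1) + 1
          · right; exact ⟨m, by omega, h1.1, h1.2, by rw [h4]; omega⟩
          · right; exact ⟨j, by omega, h2, h3, by rw [h4]; omega⟩
      · rcases ih with h | ⟨j, hj, h2, h3, h4⟩
        · left; exact h
        · right; exact ⟨j, by omega, h2, h3, h4⟩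

theorem pvAX_succ_neg (kept : List Int) (d k : Int) (m : Nat) (r : Int) (hr : 0 ≤ r)
    (h : ¬ 0 ≤ kept.getD m (-1)) :
    pvAX kept d k (m+1) r = pvAX kept d k m r := by
  unfold pvAX
  rw [pvKeep_succ_neg kept d k m r h]
  congr 1
  by_cases hrm : r = (m : Int)
  · subst hrm
    rw [if_neg, if_neg]
    · rintro ⟨-, hb⟩; rw [Int.toNat_natCast] at hb; exact h hb
    · rintro ⟨-, hb⟩; rw [Int.toNat_natCast] at hb; exact h hb
  · split_ifs with h1 h2 <;> try rfl
    · exact absurd ⟨by have := h1.1; push_cast at this; omega, h1.2⟩ h2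
    · next h3 => exact absurd ⟨by have := h3.1; push_cast; omega, h3.2⟩ h1

theorem pvAX_succ_pos (kept : List Int) (d k : Int) (m : Nat) (r : Int) (hr : 0 ≤ r)
    (hpos : 0 ≤ kept.getD m (-1)) :
    pvAX kept d k (m+1) r =
      (if PySem.Int.mod ((m:Int)*10+d) k = r then
         max (if r = (m:Int) then max (pvAX kept d k m r) (kept.getD m (-1)) else pvAX kept d k m r)
             (kept.getD m (-1) + 1)
       else if r = (m:Int) then max (pvAX kept d k m r) (kept.getD m (-1)) else pvAX kept d k m r) := by
  have hkg := pvKeep_ge kept d k m r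
  by_cases hrm : r = (m : Int)
  · subst hrm
    unfold pvAX
    rw [pvKeep_succ_pos _ _ _ _ _ hpos]
    simp only [Int.toNat_natCast]
    have hlt : ((m:Int)) < ((m+1 : Nat) : Int) := by push_cast; omega
    have hnlt : ¬ ((m:Int)) < ((m : Nat) : Int) := by omega
    split_ifs <;> omega
  · unfold pvAX
    rw [pvKeep_succ_pos _ _ _ _ _ hpos]
    have hiff : (r < ((m+1 : Nat) : Int)) ↔ (r < ((m : Nat) : Int)) := by push_cast; omega
    split_ifs <;> omega

theorem pvGetD_set (l : List Int) (a b : Nat) (v d : Int) :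
    (l.set a v).getD b d = if a = b ∧ a < l.length then v else l.getD b d := by
  simp only [List.getD_eq_getElem?_getD, List.getElem?_set]
  rcases lt_or_ge b l.length with hb | hb
  · split_ifs with h <;> simp_all
  · rw [List.getElem?_eq_none (by simpa using hb)]
    split_ifs with h <;> simp_all
    omega

-- same fact for lists of sets (used by the B-side fold)
theorem pvGetD_setS (l : List (PySem.Set Int)) (a b : Nat) (v : PySem.Set Int) :
    (l.set a v).getD b PySem.Set.empty =
      if a = b ∧ a < l.length then v else l.getD b PySem.Set.empty := by
  simp only [List.getD_eq_getElem?_getD, List.getElem?_set]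
  rcases lt_or_ge b l.length with hb | hb
  · split_ifs with h <;> simp_all
  · rw [List.getElem?_eq_none (by simpa using hb)]
    split_ifs with h <;> simp_all
    omega

theorem pvInner (k i d : Int) (hk : 0 < k) (dp_prev : PySem.Dict Int Int) (kept : List Int)
    (hlen : kept.length = k.toNat)
    (hge : ∀ n : Nat, -1 ≤ kept.getD n (-1))
    (hprev : ∀ r : Int, 0 ≤ r → r < k → dp_prev.get? r = pvToOpt i (kept.getD r.toNat (-1)))
    (m : Nat) (hm : (m : Int) ≤ k) :
    (∀ r : Int, 0 ≤ r → r < k →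
      ((PySem.List.pyRange 0 (m : Int) 1).foldl (fun dp_curr j =>
        match dp_prev.get? j with
        | none => dp_curr
        | some v =>
            let new_mod := PySem.Int.mod (j * 10 + d) k
            let dp1 := dp_curr.insert new_mod
              (match dp_curr.get? new_mod with | none => v | some w => min w v)
            dp1.insert j (match dp1.get? j with | none => v + 1 | some w => min w (v + 1))
        ) PySem.Dict.empty).get? r = pvToOpt (i + 1) (pvAX kept d k m r)) ∧
    ((PySem.List.pyRange 0 (m : Int) 1).foldl (fun nxt r =>
        if 0 ≤ kept.getD r.toNat (-1) then
          let nr := PySem.Int.mod (r * 10 + d) k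
          if kept.getD r.toNat (-1) + 1 > nxt.getD nr.toNat (-1) then
            nxt.set nr.toNat (kept.getD r.toNat (-1) + 1)
          else nxt
        else nxt) kept).length = kept.length ∧
    (∀ r : Int, 0 ≤ r → r < k →
      ((PySem.List.pyRange 0 (m : Int) 1).foldl (fun nxt r =>
        if 0 ≤ kept.getD r.toNat (-1) then
          let nr := PySem.Int.mod (r * 10 + d) k
          if kept.getD r.toNat (-1) + 1 > nxt.getD nr.toNat (-1) then
            nxt.set nr.toNat (kept.getD r.toNat (-1) + 1)
          else nxt
        else nxt) kept).getD r.toNat (-1) = max (kept.getD r.toNat (-1)) (pvKeep kept d k m r)) := by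
  induction m with
  | zero =>
      simp only [Nat.cast_zero]
      rw [PySem.List.pyRange_one_eq_nil le_rfl]
      simp only [List.foldl_nil]
      refine ⟨?_, by trivial, ?_⟩
      · intro r hr0 hrk
        have hax : pvAX kept d k 0 r = -1 := by
          unfold pvAX
          rw [if_neg (by rintro ⟨h1, -⟩; omega)]
          have : pvKeep kept d k 0 r = -1 := rfl
          omega
        rw [hax]
        simp [pvToOpt, PySem.Dict.get?_empty]
      · intro r hr0 hrk
        have hkp : pvKeep kept d k 0 r = -1 := rfl
        have := hge r.toNat
        omega
  | succ m ih =>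
      have hm' : ((m : Nat) : Int) ≤ k := by push_cast at hm ⊢; omega
      have hmk : ((m : Nat) : Int) < k := by push_cast at hm ⊢; omega
      obtain ⟨ihA, ihBlen, ihB⟩ := ih hm'
      dsimp only at ihA ihBlen ihB
      have hcast : ((m + 1 : Nat) : Int) = ((m : Nat) : Int) + 1 := by push_cast; ring
      rw [hcast, PySem.List.pyRange_one_succ_right (Int.natCast_nonneg m)]
      simp only [List.foldl_append, List.foldl_cons, List.foldl_nil]
      have hpm := hprev ((m : Nat) : Int) (Int.natCast_nonneg m) hmk
      rw [Int.toNat_natCast] at hpm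
      by_cases hpos : 0 ≤ kept.getD m (-1)
      · -- dp_prev has residue m: both transitions fire
        have hpm' : dp_prev.get? ((m : Nat) : Int) = some (i - kept.getD m (-1)) := by
          rw [hpm]; unfold pvToOpt; rw [if_pos hpos]
        have hnr0 : 0 ≤ PySem.Int.mod (((m : Nat) : Int) * 10 + d) k := PySem.Int.mod_nonneg _ hk
        have hnrk : PySem.Int.mod (((m : Nat) : Int) * 10 + d) k < k := PySem.Int.mod_lt _ hk
        refine ⟨?_, ?_, ?_⟩
        · intro r hr0 hrk
          simp only [hpm']
          rw [pvAX_succ_pos kept d k m r hr0 hpos]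
          by_cases hrm : r = ((m : Nat) : Int)
          · subst hrm
            rw [PySem.Dict.get?_insert_self]
            by_cases hmn : PySem.Int.mod (((m : Nat) : Int) * 10 + d) k = ((m : Nat) : Int)
            · rw [if_pos hmn, if_pos rfl, hmn, PySem.Dict.get?_insert_self,
                ihA ((m : Nat) : Int) hr0 hrk]
              have hax := pvAX_ge kept d k m ((m : Nat) : Int)
              by_cases hx1 : 0 ≤ pvAX kept d k m ((m : Nat) : Int)
              · rw [show pvToOpt (i+1) (pvAX kept d k m ((m : Nat) : Int))
                    = some ((i+1) - pvAX kept d k m ((m : Nat) : Int)) from by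
                  unfold pvToOpt; rw [if_pos hx1]]
                show some (min (min ((i+1) - pvAX kept d k m ((m : Nat) : Int))
                    (i - kept.getD m (-1))) (i - kept.getD m (-1) + 1)) = _
                unfold pvToOpt
                rw [if_pos (by omega)]
                simp only [Option.some.injEq]
                omega
              · rw [show pvToOpt (i+1) (pvAX kept d k m ((m : Nat) : Int)) = none from by
                  unfold pvToOpt; rw [if_neg hx1]]
                show some (min (i - kept.getD m (-1)) (i - kept.getD m (-1) + 1)) = _
                unfold pvToOpt
                rw [if_pos (by omega)]
                simp only [Option.some.injEq]
                omega
            · rw [if_neg hmn, if_pos rfl,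
                PySem.Dict.get?_insert_of_ne _ _ (Ne.symm hmn),
                ihA ((m : Nat) : Int) hr0 hrk]
              have hax := pvAX_ge kept d k m ((m : Nat) : Int)
              by_cases hx1 : 0 ≤ pvAX kept d k m ((m : Nat) : Int)
              · rw [show pvToOpt (i+1) (pvAX kept d k m ((m : Nat) : Int))
                    = some ((i+1) - pvAX kept d k m ((m : Nat) : Int)) from by
                  unfold pvToOpt; rw [if_pos hx1]]
                show some (min ((i+1) - pvAX kept d k m ((m : Nat) : Int))
                    (i - kept.getD m (-1) + 1)) = _
                unfold pvToOpt
                rw [if_pos (by omega)]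
                simp only [Option.some.injEq]
                omega
              · rw [show pvToOpt (i+1) (pvAX kept d k m ((m : Nat) : Int)) = none from by
                  unfold pvToOpt; rw [if_neg hx1]]
                show some (i - kept.getD m (-1) + 1) = _
                unfold pvToOpt
                rw [if_pos (by omega)]
                simp only [Option.some.injEq]
                omega
          · rw [PySem.Dict.get?_insert_of_ne _ _ hrm]
            by_cases hrnr : PySem.Int.mod (((m : Nat) : Int) * 10 + d) k = r
            · rw [hrnr, if_pos rfl, if_neg hrm, PySem.Dict.get?_insert_self,
                ihA r hr0 hrk]
              have hax := pvAX_ge kept d k m r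
              by_cases hx1 : 0 ≤ pvAX kept d k m r
              · rw [show pvToOpt (i+1) (pvAX kept d k m r)
                    = some ((i+1) - pvAX kept d k m r) from by
                  unfold pvToOpt; rw [if_pos hx1]]
                show some (min ((i+1) - pvAX kept d k m r) (i - kept.getD m (-1))) = _
                unfold pvToOpt
                rw [if_pos (by omega)]
                simp only [Option.some.injEq]
                omega
              · rw [show pvToOpt (i+1) (pvAX kept d k m r) = none from by
                  unfold pvToOpt; rw [if_neg hx1]]
                show some (i - kept.getD m (-1)) = _
                unfold pvToOpt
                rw [if_pos (by omega)]
                simp only [Option.some.injEq]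
                omega
            · rw [if_neg hrnr, if_neg hrm,
                PySem.Dict.get?_insert_of_ne _ _ (fun h => hrnr h.symm)]
              exact ihA r hr0 hrk
        · simp only [Int.toNat_natCast]
          rw [if_pos hpos]
          split_ifs with hgt
          · rw [List.length_set]
            exact ihBlen
          · exact ihBlen
        · intro r hr0 hrk
          simp only [Int.toNat_natCast]
          rw [if_pos hpos, pvKeep_succ_pos kept d k m r hpos]
          have hBnr := ihB (PySem.Int.mod (((m : Nat) : Int) * 10 + d) k) hnr0 hnrk
          have hBr := ihB r hr0 hrk
          have hkgr := pvKeep_ge kept d k m r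
          by_cases hrnr : PySem.Int.mod (((m : Nat) : Int) * 10 + d) k = r
          · rw [hrnr] at hBnr ⊢
            rw [if_pos rfl]
            split_ifs with hgt
            · rw [pvGetD_set, if_pos ⟨rfl, by rw [ihBlen, hlen]; omega⟩]
              omega
            · omega
          · rw [if_neg hrnr]
            split_ifs with hgt
            · rw [pvGetD_set, if_neg (by
                rintro ⟨hab, -⟩
                exact hrnr (by omega))]
              exact hBr
            · exact hBr
      · -- residue m unreachable: both loops skip this j
        have hpm' : dp_prev.get? ((m : Nat) : Int) = none := by
          rw [hpm]; unfold pvToOpt; rw [if_neg hpos]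
        refine ⟨?_, ?_, ?_⟩
        · intro r hr0 hrk
          simp only [hpm']
          rw [pvAX_succ_neg kept d k m r hr0 hpos]
          exact ihA r hr0 hrk
        · simp only [Int.toNat_natCast]
          rw [if_neg hpos]
          exact ihBlen
        · intro r hr0 hrk
          simp only [Int.toNat_natCast]
          rw [if_neg hpos, pvKeep_succ_neg kept d k m r hpos]
          exact ihB r hr0 hrk

theorem pvStep (k i d : Int) (hk : 0 < k) (dp : PySem.Dict Int Int) (kept : List Int)
    (h : pvRel k i dp kept) :
    pvRel k (i + 1) (pvA_inner dp d k) (pvGStep kept d k) := by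
  obtain ⟨hlen, h00, hge, hget⟩ := h
  have hkk : ((k.toNat : Nat) : Int) = k := Int.toNat_of_nonneg hk.le
  have H := pvInner k i d hk dp kept hlen hge hget k.toNat (le_of_eq hkk)
  rw [hkk] at H
  obtain ⟨HA, HBlen, HB⟩ := H
  unfold pvA_inner pvGStep
  refine ⟨HBlen.trans hlen, ?_, ?_, ?_⟩
  · have h0 := HB 0 le_rfl hk
    rw [show ((0 : Int).toNat) = 0 from rfl] at h0
    have := pvKeep_ge kept d k k.toNat 0
    omega
  · intro n
    by_cases hn : ((n : Nat) : Int) < k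
    · have hb := HB ((n : Nat) : Int) (Int.natCast_nonneg n) hn
      rw [Int.toNat_natCast] at hb
      have := hge n
      have := pvKeep_ge kept d k k.toNat ((n : Nat) : Int)
      omega
    · rw [List.getD_eq_default _ _ (by rw [HBlen.trans hlen]; omega)]
  · intro r hr0 hrk
    rw [HA r hr0 hrk, HB r hr0 hrk]
    have hax : pvAX kept d k k.toNat r = max (kept.getD r.toNat (-1)) (pvKeep kept d k k.toNat r) := by
      unfold pvAX
      rw [hkk]
      have := hge r.toNat
      split_ifs with hc
      · omega
      · have hcc : ¬ 0 ≤ kept.getD r.toNat (-1) := fun hx => hc ⟨hrk, hx⟩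
        omega
    rw [hax]

-- characterization of pvGStep alone (extracted from pvInner with a dict realizing kept)
theorem pvGStep_char (k i d : Int) (hk : 0 < k) (dp : PySem.Dict Int Int) (kept : List Int)
    (h : pvRel k i dp kept) :
    (pvGStep kept d k).length = kept.length ∧
    (∀ r : Int, 0 ≤ r → r < k →
      (pvGStep kept d k).getD r.toNat (-1)
        = max (kept.getD r.toNat (-1)) (pvKeep kept d k k.toNat r)) := by
  obtain ⟨hlen, h00, hge, hget⟩ := h
  have hkk : ((k.toNat : Nat) : Int) = k := Int.toNat_of_nonneg hk.le
  have H := pvInner k i d hk dp kept hlen hge hget k.toNat (le_of_eq hkk)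
  rw [hkk] at H
  exact ⟨H.2.1, H.2.2⟩

-- the B-side inner fold: after processing c from h-1 down to 0, layer t (1 ≤ t ≤ h) is
-- the union of the old layer t with the image of the old layer t-1; others unchanged
theorem pvFoldSet (d k : Int) (h : Nat) :
    ∀ (ls : List (PySem.Set Int)), h < ls.length →
    ((PySem.List.pyRange ((h : Int) - 1) (-1) (-1)).foldl
      (fun ls c =>
        ls.set (c + 1).toNat
          (PySem.Set.union (ls.getD (c + 1).toNat PySem.Set.empty)
            (pvImg (ls.getD c.toNat PySem.Set.empty) d k))) ls).length = ls.length ∧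
    ∀ t : Nat,
      ((PySem.List.pyRange ((h : Int) - 1) (-1) (-1)).foldl
        (fun ls c =>
          ls.set (c + 1).toNat
            (PySem.Set.union (ls.getD (c + 1).toNat PySem.Set.empty)
              (pvImg (ls.getD c.toNat PySem.Set.empty) d k))) ls).getD t PySem.Set.empty =
        if 1 ≤ t ∧ t ≤ h then
          PySem.Set.union (ls.getD t PySem.Set.empty)
            (pvImg (ls.getD (t - 1) PySem.Set.empty) d k)
        else ls.getD t PySem.Set.empty := by
  induction h with
  | zero =>
      intro ls _
      rw [show ((0 : Nat) : Int) - 1 = -1 by norm_num, PySem.List.pyRange_neg_one_eq_nil le_rfl]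
      constructor
      · rw [List.foldl_nil]
      · intro t
        rw [List.foldl_nil, if_neg (by omega)]
  | succ h ih =>
      intro ls hlen
      have hcons : PySem.List.pyRange (((h + 1 : Nat) : Int) - 1) (-1) (-1)
          = ((h : Nat) : Int) :: PySem.List.pyRange (((h : Nat) : Int) - 1) (-1) (-1) := by
        rw [show (((h + 1 : Nat) : Int) - 1) = ((h : Nat) : Int) from by push_cast; ring]
        exact PySem.List.pyRange_neg_one_cons (by omega)
      rw [hcons]
      simp only [List.foldl_cons]
      set ls1 := ls.set (((h : Nat) : Int) + 1).toNat
        (PySem.Set.union (ls.getD (((h : Nat) : Int) + 1).toNat PySem.Set.empty)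
          (pvImg (ls.getD (((h : Nat) : Int)).toNat PySem.Set.empty) d k)) with hls1
      have htn : (((h : Nat) : Int) + 1).toNat = h + 1 := by omega
      have htn0 : (((h : Nat) : Int)).toNat = h := by omega
      have hlen1 : ls1.length = ls.length := by rw [hls1, List.length_set]
      have hg1 : ∀ t : Nat, ls1.getD t PySem.Set.empty =
          if h + 1 = t then
            PySem.Set.union (ls.getD (h + 1) PySem.Set.empty)
              (pvImg (ls.getD h PySem.Set.empty) d k)
          else ls.getD t PySem.Set.empty := by
        intro t
        rw [hls1, htn, htn0, pvGetD_setS]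
        by_cases h1 : h + 1 = t
        · rw [if_pos ⟨h1, by omega⟩, if_pos h1, h1]
        · rw [if_neg (by tauto), if_neg h1]
      obtain ⟨ihlen, ihget⟩ := ih ls1 (by rw [hlen1]; omega)
      refine ⟨ihlen.trans hlen1, ?_⟩
      intro t
      rw [ihget t]
      by_cases h1 : 1 ≤ t ∧ t ≤ h
      · rw [if_pos h1, if_pos (by omega), hg1 t, hg1 (t - 1),
          if_neg (by omega), if_neg (by omega)]
      · rw [if_neg h1]
        by_cases h2 : t = h + 1
        · subst h2
          simp only [Nat.add_sub_cancel]
          rw [if_pos (by omega), hg1 (h + 1), if_pos rfl]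
        · rw [if_neg (by omega), hg1 t, if_neg (by omega)]

-- membership in the layers after one digit of B
theorem pvB_step_mem (layers : List (PySem.Set Int)) (d k : Int) :
    (pvB_step layers d k).length = layers.length + 1 ∧
    (pvB_step layers d k).getD 0 PySem.Set.empty = layers.getD 0 PySem.Set.empty ∧
    (∀ c : Nat, ∀ r : Int,
      r ∈ (pvB_step layers d k).getD (c + 1) PySem.Set.empty ↔
        (r ∈ layers.getD (c + 1) PySem.Set.empty ∨
         ∃ j ∈ layers.getD c PySem.Set.empty, PySem.Int.mod (j * 10 + d) k = r)) := by
  have hdef : pvB_step layers d k =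
      (PySem.List.pyRange ((((layers ++ [(PySem.Set.empty : PySem.Set Int)]).length : Nat) : Int) - 2) (-1) (-1)).foldl
        (fun ls c =>
          ls.set (c + 1).toNat
            (PySem.Set.union (ls.getD (c + 1).toNat PySem.Set.empty)
              (pvImg (ls.getD c.toNat PySem.Set.empty) d k)))
        (layers ++ [(PySem.Set.empty : PySem.Set Int)]) := rfl
  rw [hdef]
  set ls := layers ++ [(PySem.Set.empty : PySem.Set Int)] with hls
  have hlslen : ls.length = layers.length + 1 := by
    rw [hls, List.length_append, List.length_singleton]
  have hrange : ((ls.length : Int) - 2) = ((layers.length : Nat) : Int) - 1 := by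
    rw [hlslen]; push_cast; ring
  have hgls : ∀ t : Nat, ls.getD t PySem.Set.empty = layers.getD t PySem.Set.empty := by
    intro t
    rw [hls]
    rcases lt_trichotomy t layers.length with h | h | h
    · rw [List.getD_eq_getElem?_getD, List.getElem?_append_left h,
        ← List.getD_eq_getElem?_getD]
    · subst h
      rw [List.getD_eq_getElem?_getD, List.getElem?_append_right le_rfl]
      simp [List.getD_eq_getElem?_getD]
    · rw [List.getD_eq_default _ _ (by rw [List.length_append, List.length_singleton]; omega),
        List.getD_eq_default _ _ (by omega)]
  rw [hrange]
  obtain ⟨hflen, hfget⟩ := pvFoldSet d k layers.length ls (by omega)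
  refine ⟨hflen.trans hlslen, ?_, ?_⟩
  · rw [hfget 0, if_neg (by omega), hgls 0]
  · intro c r
    rw [hfget (c + 1)]
    by_cases hc : c + 1 ≤ layers.length
    · rw [if_pos ⟨by omega, hc⟩]
      simp only [Nat.add_sub_cancel]
      rw [hgls (c + 1), hgls c]
      simp only [PySem.Set.mem_union, pvImg, PySem.Set.mem_ofList, List.mem_map]
    · rw [if_neg (by omega), hgls (c + 1)]
      have hno : layers.getD (c + 1) PySem.Set.empty = PySem.Set.empty :=
        List.getD_eq_default _ _ (by omega)
      have hno' : layers.getD c PySem.Set.empty = PySem.Set.empty :=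
        List.getD_eq_default _ _ (by omega)
      rw [hno, hno']
      simp [PySem.Set.empty]
  
-- one digit of B preserves the layer invariant against the ghost step
theorem pvLStep (k d : Int) (hk : 0 < k) (i : Nat) (layers : List (PySem.Set Int))
    (kept : List Int)
    (hchar : ∀ r : Int, 0 ≤ r → r < k →
      (pvGStep kept d k).getD r.toNat (-1)
        = max (kept.getD r.toNat (-1)) (pvKeep kept d k k.toNat r))
    (hinv : pvLInv k i layers kept) :
    pvLInv k (i + 1) (pvB_step layers d k) (pvGStep kept d k) := by
  obtain ⟨hlen, h0, hbnd, hmax⟩ := hinv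
  obtain ⟨hslen, hs0, hsmem⟩ := pvB_step_mem layers d k
  -- any source j of a transition sits in some layer, hence kept j ≥ that layer
  have hsrc : ∀ (c : Nat) (j : Int), j ∈ layers.getD c PySem.Set.empty →
      0 ≤ j ∧ j < k ∧ (c : Int) ≤ kept.getD j.toNat (-1) := by
    intro c j hj
    obtain ⟨hj0, hjk⟩ := hbnd c j hj
    refine ⟨hj0, hjk, ?_⟩
    rcases hmax j hj0 hjk with ⟨-, hnone⟩ | ⟨cj, hcj, -, htop⟩
    · exact absurd hj (hnone c)
    · rw [hcj]
      by_contra hlt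
      exact htop c (by omega) hj
  -- a keep-transition source gives a lower bound on pvKeep
  have hkeep_lb : ∀ (c : Nat) (j r : Int), j ∈ layers.getD c PySem.Set.empty →
      PySem.Int.mod (j * 10 + d) k = r →
      (c : Int) + 1 ≤ pvKeep kept d k k.toNat r := by
    intro c j r hj ht
    obtain ⟨hj0, hjk, hcle⟩ := hsrc c j hj
    have hjt : ((j.toNat : Nat) : Int) = j := Int.toNat_of_nonneg hj0
    have := pvKeep_ge_of kept d k k.toNat r j.toNat (by omega)
      (by rw [hjt] at *; omega) (by rw [hjt]; exact ht)
    omega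
  refine ⟨by omega, by rw [hs0]; exact h0, ?_, ?_⟩
  · -- bounds
    intro c r hr
    match c with
    | 0 =>
        rw [hs0] at hr
        exact hbnd 0 r hr
    | c + 1 =>
        rcases (hsmem c r).mp hr with h | ⟨j, hj, hje⟩
        · exact hbnd (c + 1) r h
        · rw [← hje]
          exact ⟨PySem.Int.mod_nonneg _ hk, PySem.Int.mod_lt _ hk⟩
  · -- topmost-layer characterization
    intro r hr0 hrk
    rw [hchar r hr0 hrk]
    have hkg := pvKeep_ge kept d k k.toNat r
    rcases hmax r hr0 hrk with ⟨hval, hnone⟩ | ⟨c0, hc0, hc0mem, hc0top⟩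
    · -- r was nowhere; it is reachable now iff pvKeep ≥ 0
      rcases pvKeep_attained kept d k k.toNat r with hK | ⟨j, hjm, hj0, hjt, hKv⟩
      · left
        refine ⟨by rw [hval, hK]; rfl, ?_⟩
        intro c hc
        match c with
        | 0 =>
            rw [hs0] at hc
            exact hnone 0 hc
        | c + 1 =>
            rcases (hsmem c r).mp hc with h | ⟨j, hj, hje⟩
            · exact hnone (c + 1) h
            · have := hkeep_lb c j r hj hje
              omega
      · -- pvKeep attained from source residue j (a Nat < k.toNat); find j's layer
        right
        have hjk : ((j : Nat) : Int) < k := by omega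
        rcases hmax ((j : Nat) : Int) (Int.natCast_nonneg j) hjk with
          ⟨hjv, hjnone⟩ | ⟨cj, hcjv, hcjmem, hcjtop⟩
        · rw [Int.toNat_natCast] at hjv; omega
        · rw [Int.toNat_natCast] at hcjv
          refine ⟨cj + 1, ?_, ?_, ?_⟩
          · push_cast; omega
          · exact (hsmem cj r).mpr (Or.inr ⟨((j : Nat) : Int), hcjmem, hjt⟩)
          · intro c' hc' hmem
            match c' with
            | 0 => omega
            | c' + 1 =>
                rcases (hsmem c' r).mp hmem with h | ⟨j', hj', hje'⟩
                · exact hnone (c' + 1) h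
                · have := hkeep_lb c' j' r hj' hje'
                  omega
    · -- r was topmost at c0; new topmost is max(c0, pvKeep)
      right
      by_cases hcase : pvKeep kept d k k.toNat r ≤ (c0 : Int)
      · -- stays at c0
        refine ⟨c0, by rw [hc0]; omega, ?_, ?_⟩
        · match c0 with
          | 0 => rw [hs0]; exact hc0mem
          | c0 + 1 => exact (hsmem c0 r).mpr (Or.inl hc0mem)
        · intro c' hc' hmem
          match c' with
          | 0 => omega
          | c' + 1 =>
              rcases (hsmem c' r).mp hmem with h | ⟨j', hj', hje'⟩
              · exact hc0top (c' + 1) (by omega) h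
              · have := hkeep_lb c' j' r hj' hje'
                omega
      · -- pvKeep wins; it is attained, locate the source's layer
        rcases pvKeep_attained kept d k k.toNat r with hK | ⟨j, hjm, hj0, hjt, hKv⟩
        · omega
        · have hjk : ((j : Nat) : Int) < k := by omega
          rcases hmax ((j : Nat) : Int) (Int.natCast_nonneg j) hjk with
            ⟨hjv, -⟩ | ⟨cj, hcjv, hcjmem, hcjtop⟩
          · rw [Int.toNat_natCast] at hjv; omega
          · rw [Int.toNat_natCast] at hcjv
            refine ⟨cj + 1, by push_cast; omega, ?_, ?_⟩
            · exact (hsmem cj r).mpr (Or.inr ⟨((j : Nat) : Int), hcjmem, hjt⟩)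
            · intro c' hc' hmem
              match c' with
              | 0 => omega
              | c' + 1 =>
                  rcases (hsmem c' r).mp hmem with h | ⟨j', hj', hje'⟩
                  · exact hc0top (c' + 1) (by omega) h
                  · have := hkeep_lb c' j' r hj' hje'
                    omega

-- the joint outer loop over the digits
theorem pvOuter (k : Int) (hk : 0 < k) (cs : List Char) :
    ∀ (i : Nat) (dp : PySem.Dict Int Int) (layers : List (PySem.Set Int)) (kept : List Int),
      pvRel k (i : Int) dp kept → pvLInv k i layers kept →
      pvRel k ((i : Int) + cs.length)
        (cs.foldl (fun dp_prev c => pvA_inner dp_prev (pvDigit c) k) dp)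
        (cs.foldl (fun kept c => pvGStep kept (pvDigit c) k) kept) ∧
      pvLInv k (i + cs.length)
        (cs.foldl (fun ls c => pvB_step ls (pvDigit c) k) layers)
        (cs.foldl (fun kept c => pvGStep kept (pvDigit c) k) kept) := by
  induction cs with
  | nil => intro i dp layers kept h1 h2; simpa using ⟨h1, h2⟩
  | cons c cs ih =>
      intro i dp layers kept h1 h2
      have hA := pvStep k (i : Int) (pvDigit c) hk dp kept h1
      have hchar := (pvGStep_char k (i : Int) (pvDigit c) hk dp kept h1).2
      have hL := pvLStep k (pvDigit c) hk i layers kept hchar h2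
      have hcast : ((i : Int) + 1) = (((i + 1 : Nat) : Nat) : Int) := by push_cast; ring
      rw [hcast] at hA
      obtain ⟨r1, r2⟩ := ih (i + 1) _ _ _ hA hL
      simp only [List.foldl_cons, List.length_cons] at *
      constructor
      · have : ((i + 1 : Nat) : Int) + (cs.length : Int) = (i : Int) + ((cs.length : Int) + 1) := by
          push_cast; ring
        rwa [this] at r1
      · have : i + 1 + cs.length = i + (cs.length + 1) := by omega
        rwa [this] at r2

-- descending find?: the first hit from the top is the largest index satisfying P
theorem pvFindDesc (P : Int → Bool) (m : Int) (hm : 0 ≤ m) (hP : P m = true) :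
    ∀ a : Nat, m ≤ (a : Int) → (∀ x : Int, m < x → x ≤ (a : Int) → P x = false) →
    (PySem.List.pyRange ((a : Int)) (-1) (-1)).find? P = some m := by
  intro a
  induction a with
  | zero =>
      intro ha _
      have hm0 : m = 0 := by omega
      subst hm0
      rw [show ((0 : Nat) : Int) = 0 from rfl,
        PySem.List.pyRange_neg_one_cons (by omega : (-1:Int) < 0),
        show (0:Int) - 1 = -1 by norm_num,
        PySem.List.pyRange_neg_one_eq_nil (le_refl (-1:Int))]
      simp [List.find?, hP]
  | succ a ih =>
      intro ha hnone
      rw [PySem.List.pyRange_neg_one_cons (by omega : (-1:Int) < ((a+1 : Nat) : Int))]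
      by_cases hma : m = ((a + 1 : Nat) : Int)
      · rw [List.find?_cons, ← hma, hP]
      · have hPa : P ((a + 1 : Nat) : Int) = false :=
          hnone _ (by omega) le_rfl
        rw [List.find?_cons, hPa]
        have : (((a + 1 : Nat) : Int) - 1) = ((a : Nat) : Int) := by push_cast; ring
        rw [this]
        exact ih (by omega) (fun x h1 h2 => hnone x h1 (by omega))

-- ===== VERDICT (by name: the statement is the Claim_ definition above) =====
theorem min_deletions_to_make_multiple_spec : Claim_equal_min_deletions_to_make_multiple := by
  intro n_str k _ hpre
  obtain ⟨hk0, -⟩ := hpre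
  rcases hk0 with hk | hnil
  case inr =>
    -- empty string: both sides reduce to 0 with no digit processed
    unfold Spec_min_deletions_to_make_multiple min_deletions_to_make_multiple
      min_deletions_to_make_multiple_alt
    dsimp only
    rw [hnil]
    simp only [List.foldl_nil]
    rw [PySem.Dict.get?_insert_self]
    have hr : PySem.List.pyRange (([PySem.Set.ofList [(0 : Int)]].length : Int) - 1) (-1) (-1)
        = [0] := by
      norm_num
      rw [PySem.List.pyRange_neg_one_cons (by omega : (-1:Int) < 0),
        show (0:Int) - 1 = -1 by norm_num,
        PySem.List.pyRange_neg_one_eq_nil (le_refl (-1:Int))]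
    rw [hr]
    have hfind : ([(0 : Int)].find?
        (fun c => PySem.Set.contains (([PySem.Set.ofList [(0 : Int)]]).getD c.toNat PySem.Set.empty) 0))
        = some 0 := by decide
    rw [hfind]
    simp [PySem.Str.len_eq, hnil]
  have hk' : (0 : Int) < k := by omega
  -- initial ghost array: residue 0 kept 0 digits, everything else unreachable
  have hrep : ∀ n : Nat, (List.replicate k.toNat (-1 : Int)).getD n (-1) = -1 := by
    intro n
    simp only [List.getD_eq_getElem?_getD, List.getElem?_replicate]
    split_ifs <;> rfl
  have hk0 : 0 < k.toNat := by omega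
  have hkept00 : ((List.replicate k.toNat (-1 : Int)).set 0 0).getD 0 (-1) = 0 := by
    rw [pvGetD_set, if_pos ⟨rfl, by rw [List.length_replicate]; omega⟩]
  have h0 : pvRel k 0 ((PySem.Dict.empty : PySem.Dict Int Int).insert 0 0)
      ((List.replicate k.toNat (-1 : Int)).set 0 0) := by
    refine ⟨by rw [List.length_set, List.length_replicate], by rw [hkept00], ?_, ?_⟩
    · intro n
      rw [pvGetD_set]
      split_ifs with hc
      · omega
      · rw [hrep]
    · intro r hr0 hrk
      rw [PySem.Dict.get?_insert]
      by_cases hr : r = 0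
      · subst hr
        rw [if_pos rfl, show ((0 : Int).toNat) = 0 from rfl, hkept00]
        unfold pvToOpt
        rw [if_pos le_rfl]
        norm_num
      · rw [if_neg hr, PySem.Dict.get?_empty,
          pvGetD_set, if_neg (by rintro ⟨hab, -⟩; exact hr (by omega)), hrep]
        unfold pvToOpt
        rw [if_neg (by omega)]
  -- initial layers: [{0}]
  have hl0 : pvLInv k 0 [PySem.Set.ofList [(0 : Int)]]
      ((List.replicate k.toNat (-1 : Int)).set 0 0) := by
    refine ⟨rfl, rfl, ?_, ?_⟩
    · intro c r hr
      match c with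
      | 0 =>
          have : r = 0 := by
            simpa [PySem.Set.ofList, PySem.Set.add, PySem.Set.contains] using hr
          omega
      | c + 1 => simp [List.getD] at hr
    · intro r hr0 hrk
      by_cases hr : r = 0
      · subst hr
        right
        refine ⟨0, by simpa using hkept00, ?_, ?_⟩
        · show (0 : Int) ∈ ([(0 : Int)] : List Int); simp
        · intro c' hc' hmem
          match c' with
          | 0 => omega
          | c' + 1 => simp [List.getD] at hmem
      · left
        refine ⟨?_, ?_⟩
        · rw [pvGetD_set, if_neg (by rintro ⟨hab, -⟩; exact hr (by omega)), hrep]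
        · intro c hmem
          match c with
          | 0 =>
              have : r = 0 := by
                simpa [PySem.Set.ofList, PySem.Set.add, PySem.Set.contains] using hmem
              exact hr this
          | c + 1 => simp [List.getD] at hmem
  obtain ⟨hrel, hlinv⟩ := pvOuter k hk' n_str.toList 0 _ _ _ h0 hl0
  obtain ⟨hlen, h00, hge, hget⟩ := hrel
  obtain ⟨hllen, -, -, hlmax⟩ := hlinv
  unfold Spec_min_deletions_to_make_multiple min_deletions_to_make_multiple
    min_deletions_to_make_multiple_alt
  dsimp only
  set kept := n_str.toList.foldl (fun kept c => pvGStep kept (pvDigit c) k)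
    ((List.replicate k.toNat (-1 : Int)).set 0 0) with hkept
  set layers := n_str.toList.foldl (fun ls c => pvB_step ls (pvDigit c) k)
    [PySem.Set.ofList [(0 : Int)]] with hlayers
  -- A's side: dp[0] = some (len - kept₀)
  have hg := hget 0 le_rfl hk'
  simp only [Int.toNat_zero] at hg
  rw [hg]
  unfold pvToOpt
  rw [if_pos h00]
  -- B's side: the descending scan finds exactly c = kept₀
  rcases hlmax 0 le_rfl hk' with ⟨hv, -⟩ | ⟨c0, hc0v, hc0mem, hc0top⟩
  · simp only [Int.toNat_zero] at hv; omega
  rw [Int.toNat_zero] at hc0v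
  have hc0len : c0 < layers.length := by
    by_contra hge'
    exact absurd hc0mem (by rw [List.getD_eq_default _ _ (by omega)]; simp [PySem.Set.empty])
  have hfind : (PySem.List.pyRange ((layers.length : Int) - 1) (-1) (-1)).find?
      (fun c => PySem.Set.contains (layers.getD c.toNat PySem.Set.empty) 0) = some (c0 : Int) := by
    have hlm1 : ((layers.length : Int) - 1) = ((n_str.toList.length : Nat) : Int) := by
      rw [hllen]; push_cast; ring
    rw [hlm1]
    apply pvFindDesc _ _ (Int.natCast_nonneg c0)
    · rw [Int.toNat_natCast]
      exact (PySem.Set.contains_iff _ _).mpr hc0mem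
    · omega
    · intro x h1 h2
      have hx0 : 0 ≤ x := by omega
      have hxm : (0 : Int) ∉ layers.getD x.toNat PySem.Set.empty :=
        hc0top x.toNat (by omega)
      exact Bool.eq_false_iff.mpr
        (fun hcon => hxm ((PySem.Set.contains_iff _ _).mp hcon))
  rw [hfind]
  simp only [Option.getD_some, hc0v]
  rw [PySem.Str.len_eq]
  push_cast
  ring
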